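-- pv_equiv track=rewrite | github.com/lowwwkey/Symp-Diag-Embedding-Model | extract_feature.py | to_extract
-- ===== SOURCE A (Python) =====
-- from collections import defaultdict, Counter
--
-- def to_extract(emr_lst, min_num=30):
--     """
--     返回待提取的病历各部分内容
--     Args:
--         emr_lst
--         min_num: 最少病历数量
--     Returns:
--         病历各部分内容，{'诊断1':{'cc':[...], 'hpi':[...], ...}, ...}
--     """
--     cl_emr = {}
--     diag = []
--     for emr in emr_lst:
--         cl_emr[emr[5]] = cl_emr.get(emr[5], defaultdict(list))
--         cl_emr[emr[5]]['cc'].append(emr[0])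
--         cl_emr[emr[5]]['hpi'].append(emr[1])
--         cl_emr[emr[5]]['ph'].append(emr[2])
--         cl_emr[emr[5]]['fh'].append(emr[3])
--         cl_emr[emr[5]]['pe'].append(emr[4])
--         diag.append(emr[5])
--
--     # diag_count = Counter(diag)
--     # diag_count = sorted(diag_count.items(), key=lambda item: item[1], reverse=True)
--
--     # return {key: value for key, value in cl_emr.items() if key in [i[0] for i in diag_count if i[1]>min_num]}
--     return cl_emr
-- ===== SOURCE B (Python) =====
-- from collections import defaultdict
--
-- def to_extract(emr_lst, min_num=30):
--     # pass 1: partition records by diagnosis, preserving first-appearance order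
--     groups = {}
--     for emr in emr_lst:
--         groups.setdefault(emr[5], []).append(emr)
--     # pass 2: transpose each group into its five section columns
--     result = {}
--     for diag, rows in groups.items():
--         section = defaultdict(list)
--         section['cc'] = [r[0] for r in rows]
--         section['hpi'] = [r[1] for r in rows]
--         section['ph'] = [r[2] for r in rows]
--         section['fh'] = [r[3] for r in rows]
--         section['pe'] = [r[4] for r in rows]
--         result[diag] = section
--     return result
-- ===== Notes on version B (the rewrite author's own statement) =====
-- stated objective: alternative
-- what changed: Replaces A's single interleaved scan that appends into nested dicts record-by-record with a partition-then-transpose scheme: one grouping pass by diagnosis, then per-group column extraction via list comprehensions.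
import Mathlib
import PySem

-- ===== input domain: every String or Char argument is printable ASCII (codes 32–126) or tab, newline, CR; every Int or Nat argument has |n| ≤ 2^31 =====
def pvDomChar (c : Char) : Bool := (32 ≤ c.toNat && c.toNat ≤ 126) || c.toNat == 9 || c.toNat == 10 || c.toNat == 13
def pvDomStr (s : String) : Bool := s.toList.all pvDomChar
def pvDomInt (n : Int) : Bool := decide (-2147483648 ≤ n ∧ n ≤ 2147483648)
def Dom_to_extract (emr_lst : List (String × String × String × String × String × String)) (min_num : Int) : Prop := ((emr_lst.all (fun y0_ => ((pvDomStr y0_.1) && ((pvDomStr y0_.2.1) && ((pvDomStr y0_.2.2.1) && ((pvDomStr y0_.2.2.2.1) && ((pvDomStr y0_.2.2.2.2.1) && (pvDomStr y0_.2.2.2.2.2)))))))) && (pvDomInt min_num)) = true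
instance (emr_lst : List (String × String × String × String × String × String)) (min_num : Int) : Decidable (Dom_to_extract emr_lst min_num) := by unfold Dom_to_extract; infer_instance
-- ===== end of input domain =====

-- B replaces A's single interleaved append-per-record scan by a partition-then-transpose scheme (alternative decomposition, same cost).
-- ===== PORT A =====
abbrev PvRow := String × String × String × String × String × String

def pvKey (e : PvRow) : String := e.2.2.2.2.2

-- the five in-place appends 'cl_emr[k][sec].append(...)' performed for one record
def pvMutA (inner : PySem.Dict String (List String)) (e : PvRow) : PySem.Dict String (List String) :=
  (((((inner.modify "cc" [] (fun l => l ++ [e.1])).modify "hpi" [] (fun l => l ++ [e.2.1])).modify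
      "ph" [] (fun l => l ++ [e.2.2.1])).modify "fh" [] (fun l => l ++ [e.2.2.2.1])).modify
      "pe" [] (fun l => l ++ [e.2.2.2.2.1]))

-- one iteration of A's loop: cl_emr[k] = cl_emr.get(k, defaultdict(list)); then the appends
def pvStepA (d : PySem.Dict String (PySem.Dict String (List String))) (e : PvRow) :
    PySem.Dict String (PySem.Dict String (List String)) :=
  d.insert (pvKey e) (pvMutA (d.getD (pvKey e) PySem.Dict.empty) e)

def to_extract (emr_lst : List (String × String × String × String × String × String)) (min_num : Int) : List (String × List (String × List String)) :=
  ((emr_lst.foldl pvStepA PySem.Dict.empty).items).map (fun p => (p.1, p.2.items))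

-- ===== PORT B =====
-- pass 1 of Source B: groups.setdefault(emr[5], []).append(emr)
def pvGroup (emr_lst : List PvRow) : PySem.Dict String (List PvRow) :=
  emr_lst.foldl (fun d e => d.modify (pvKey e) [] (fun rs => rs ++ [e])) PySem.Dict.empty

-- pass 2 of Source B: the five column comprehensions, keys in order cc,hpi,ph,fh,pe
def pvSections (rows : List PvRow) : List (String × List String) :=
  [("cc", rows.map (·.1)), ("hpi", rows.map (·.2.1)), ("ph", rows.map (·.2.2.1)),
   ("fh", rows.map (·.2.2.2.1)), ("pe", rows.map (·.2.2.2.2.1))]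

def to_extract_alt (emr_lst : List (String × String × String × String × String × String)) (min_num : Int) : List (String × List (String × List String)) :=
  (pvGroup emr_lst).items.map (fun p => (p.1, pvSections p.2))

-- ===== PRECONDITION & SPEC =====
def Spec_to_extract (emr_lst : List (String × String × String × String × String × String)) (min_num : Int) (out : List (String × List (String × List String))) : Prop := out = to_extract_alt emr_lst min_num
instance (emr_lst : List (String × String × String × String × String × String)) (min_num : Int) (out : List (String × List (String × List String))) : Decidable (Spec_to_extract emr_lst min_num out) := by unfold Spec_to_extract; infer_instance

-- ===== CLAIM (what is proved, stated in full; the proofs are below) =====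
def Claim_equal_to_extract : Prop := ∀ (emr_lst : List (String × String × String × String × String × String)) (min_num : Int), Dom_to_extract emr_lst min_num → Spec_to_extract emr_lst min_num (to_extract emr_lst min_num)

-- ===== LEMMAS AND PROOFS =====

-- ===== VERDICT (by name: the statement is the Claim_ definition above) =====
-- inner dict literal with the five section keys in A's insertion order
def pvInner (a b c f p : List String) : PySem.Dict String (List String) :=
  PySem.Dict.mk [("cc", a), ("hpi", b), ("ph", c), ("fh", f), ("pe", p)]

theorem pvMutA_empty (e : PvRow) :
    pvMutA PySem.Dict.empty e = pvInner [e.1] [e.2.1] [e.2.2.1] [e.2.2.2.1] [e.2.2.2.2.1] := by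
  rfl

theorem pvMutA_inner (a b c f p : List String) (e : PvRow) :
    pvMutA (pvInner a b c f p) e =
      pvInner (a ++ [e.1]) (b ++ [e.2.1]) (c ++ [e.2.2.1]) (f ++ [e.2.2.2.1]) (p ++ [e.2.2.2.2.1]) := by
  simp [pvMutA, pvInner, PySem.Dict.modify, PySem.Dict.insert, PySem.Dict.getD, PySem.Dict.get?]

theorem pvMutA_fold (rows : List PvRow) (a b c f p : List String) :
    rows.foldl pvMutA (pvInner a b c f p) =
      pvInner (a ++ rows.map (·.1)) (b ++ rows.map (·.2.1)) (c ++ rows.map (·.2.2.1))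
        (f ++ rows.map (·.2.2.2.1)) (p ++ rows.map (·.2.2.2.2.1)) := by
  induction rows generalizing a b c f p with
  | nil => simp
  | cons r rest ih => simp [List.foldl_cons, pvMutA_inner, ih]

theorem pvMutA_fold_items (rows : List PvRow) (hne : rows ≠ []) :
    (rows.foldl pvMutA PySem.Dict.empty).items = pvSections rows := by
  cases rows with
  | nil => exact absurd rfl hne
  | cons r rest =>
    rw [List.foldl_cons, pvMutA_empty, pvMutA_fold]
    simp [pvInner, pvSections]

theorem pvA_getD (l : List PvRow) (d : PySem.Dict String (PySem.Dict String (List String))) (k : String) :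
    (l.foldl pvStepA d).getD k PySem.Dict.empty =
      (l.filter (fun e => pvKey e == k)).foldl pvMutA (d.getD k PySem.Dict.empty) := by
  induction l generalizing d with
  | nil => rfl
  | cons e rest ih =>
    by_cases h : pvKey e = k
    · simp [List.foldl_cons, ih, pvStepA, h, PySem.Dict.getD_insert_self]
    · simp [List.foldl_cons, ih, pvStepA, h, PySem.Dict.getD_insert_of_ne _ _ _ (Ne.symm h)]

theorem pvB_getD (l : List PvRow) (d : PySem.Dict String (List PvRow)) (k : String) :
    (l.foldl (fun d e => d.modify (pvKey e) [] (fun rs => rs ++ [e])) d).getD k [] =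
      d.getD k [] ++ l.filter (fun e => pvKey e == k) := by
  induction l generalizing d with
  | nil => simp
  | cons e rest ih =>
    by_cases h : pvKey e = k
    · simp [List.foldl_cons, ih, h, PySem.Dict.getD_modify_self]
    · simp [List.foldl_cons, ih, h, PySem.Dict.getD_modify_of_ne _ _ _ (Ne.symm h)]

theorem pvA_keys (l : List PvRow) :
    (l.foldl pvStepA PySem.Dict.empty).keys = PySem.Set.ofList (l.map pvKey) := by
  have h : l.foldl pvStepA PySem.Dict.empty =
      l.foldl (fun d x => d.insert (pvKey x) ((fun d e => pvMutA (d.getD (pvKey e) PySem.Dict.empty) e) d x)) PySem.Dict.empty := rfl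
  rw [h, PySem.Dict.keys_foldl_insert_key, PySem.Dict.keys_empty, PySem.Set.update_nil_left]

theorem pvB_keys (l : List PvRow) :
    (pvGroup l).keys = PySem.Set.ofList (l.map pvKey) := by
  rw [pvGroup, PySem.Dict.keys_foldl_modify_key l pvKey [] (fun _ e rs => rs ++ [e]),
    PySem.Dict.keys_empty, PySem.Set.update_nil_left]

theorem pvA_nodup (l : List PvRow) :
    (l.foldl pvStepA PySem.Dict.empty).keys.Nodup := by
  have h : l.foldl pvStepA PySem.Dict.empty =
      l.foldl (fun d x => d.insert (pvKey x) ((fun d e => pvMutA (d.getD (pvKey e) PySem.Dict.empty) e) d x)) PySem.Dict.empty := rfl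
  rw [h]
  exact PySem.Dict.nodup_keys_foldl_insert_key _ _ _ _ (by simp [PySem.Dict.keys_empty])

theorem pvB_nodup (l : List PvRow) : (pvGroup l).keys.Nodup := by
  exact PySem.Dict.nodup_keys_foldl_modify_key l pvKey [] (fun _ e rs => rs ++ [e]) _ (by simp [PySem.Dict.keys_empty])

theorem to_extract_spec : Claim_equal_to_extract := by
  intro l min_num _hdom
  unfold Spec_to_extract to_extract to_extract_alt
  rw [PySem.Dict.items_eq_map_keys _ (pvA_nodup l) PySem.Dict.empty,
      PySem.Dict.items_eq_map_keys _ (pvB_nodup l) []]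
  rw [pvA_keys, pvB_keys, List.map_map, List.map_map]
  apply List.map_congr_left
  intro k hk
  have hk' : k ∈ l.map pvKey := (PySem.Set.mem_ofList _ _).mp hk
  obtain ⟨e, he, hke⟩ := List.mem_map.mp hk'
  have hne : l.filter (fun e => pvKey e == k) ≠ [] := by
    intro hcontra
    have : e ∈ l.filter (fun e => pvKey e == k) := List.mem_filter.mpr ⟨he, by simp [hke]⟩
    simp [hcontra] at this
  simp only [Function.comp]
  rw [pvA_getD, pvGroup, pvB_getD]
  simp [PySem.Dict.getD_empty, pvMutA_fold_items _ hne]
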